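-- pv_equiv track=rewrite | github.com/Milesi3/advaced_py | HW3/task4.py | camping_vocabulary
-- ===== SOURCE A (Python) =====
-- def camping_vocabulary(friends):
--     vocabulary = {}
--
--     # Создание словаря
--     for friend, things in friends.items():
--         vocabulary[friend] = set(things)
--
--     # Нахождение вещей, общих для всех друзей
--     common_things = set.intersection(*vocabulary.values())
--
--     # Поиск вещей, общих для всех друзей
--     unique_things = {}
--     for friend, things in vocabulary.items():
--         unique_things[friend] = things - set.union(*(vocabulary[f] for f in vocabulary if f != friend))
--
--     # Находит вещи, которые есть у всех, кроме одного друга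
--     one_friend_missing = {}
--     for friend, things in vocabulary.items():
--         others_things = set.union(*(vocabulary[f] for f in vocabulary if f != friend))
--         one_friend_missing[friend] = others_things - things
--
--     return common_things, unique_things, one_friend_missing
-- ===== SOURCE B (Python) =====
-- def camping_vocabulary(friends):
--     items = [(name, set(things)) for name, things in friends.items()]
--     # suffix[j] = union of the sets of items[j:]
--     suffix = [set()]
--     for _, s in reversed(items):
--         suffix = [s | suffix[0]] + suffix
--     common = items[0][1]
--     for _, s in items[1:]:
--         common = common & s
--     unique = {}
--     one_friend_missing = {}
--     prefix = set()
--     for i, (name, s) in enumerate(items):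
--         others = prefix | suffix[i + 1]
--         unique[name] = s - others
--         one_friend_missing[name] = others - s
--         prefix = prefix | s
--     return common, unique, one_friend_missing
-- ===== Notes on version B (the rewrite author's own statement) =====
-- stated objective: alternative
-- what changed: B replaces A's per-friend recomputation of the union of all other friends' sets (a fresh (n-1)-way union per friend, done twice) by one suffix-union array plus a running prefix union, so each friend's 'others' union is a single binary union; the intermediate dict of sets is replaced by one indexed pass over the items list.
import Mathlib
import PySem

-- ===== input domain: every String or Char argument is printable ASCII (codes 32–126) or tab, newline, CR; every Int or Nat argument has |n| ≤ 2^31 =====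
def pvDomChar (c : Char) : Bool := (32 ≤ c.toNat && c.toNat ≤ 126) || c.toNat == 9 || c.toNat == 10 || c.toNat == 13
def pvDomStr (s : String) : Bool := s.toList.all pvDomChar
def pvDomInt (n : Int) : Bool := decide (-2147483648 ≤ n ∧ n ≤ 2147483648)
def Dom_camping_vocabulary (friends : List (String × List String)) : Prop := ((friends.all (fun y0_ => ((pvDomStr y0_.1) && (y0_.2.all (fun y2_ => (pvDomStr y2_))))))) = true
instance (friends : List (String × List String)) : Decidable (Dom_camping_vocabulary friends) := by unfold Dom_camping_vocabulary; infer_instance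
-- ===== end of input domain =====

-- B replaces A's per-friend (n-1)-way re-unions by one suffix-union array plus a running
-- prefix union: a genuinely different, output-linear traversal (not measured faster here,
-- since the returned dicts themselves have size n*U).

-- ===== PORT A =====
-- set.intersection(*vals) / set.union(*vals): left folds over a nonempty argument list
-- (Python raises TypeError on an empty one; Pre_ keeps those inputs out, [] here is junk).
def pvInterFold (vals : List (PySem.Set String)) : PySem.Set String :=
  match vals with
  | [] => []
  | v :: vs => vs.foldl PySem.Set.inter v

def pvUnionFold (vals : List (PySem.Set String)) : PySem.Set String :=
  match vals with
  | [] => []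
  | v :: vs => vs.foldl PySem.Set.union v

def camping_vocabulary (friends : List (String × List String)) : List String × (List (String × List String)) × (List (String × List String)) :=
  let vocabulary : PySem.Dict String (PySem.Set String) :=
    friends.foldl (fun d p => d.insert p.1 (PySem.Set.ofList p.2)) PySem.Dict.empty
  let common_things := pvInterFold vocabulary.values
  let unique_things : PySem.Dict String (PySem.Set String) :=
    vocabulary.items.foldl (fun u p =>
      u.insert p.1 (PySem.Set.diff p.2
        (pvUnionFold ((vocabulary.keys.filter (fun f => f != p.1)).map (fun f => vocabulary.getD f [])))))
      PySem.Dict.empty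
  let one_friend_missing : PySem.Dict String (PySem.Set String) :=
    vocabulary.items.foldl (fun u p =>
      let others_things :=
        pvUnionFold ((vocabulary.keys.filter (fun f => f != p.1)).map (fun f => vocabulary.getD f []))
      u.insert p.1 (PySem.Set.diff others_things p.2))
      PySem.Dict.empty
  (common_things, unique_things.items, one_friend_missing.items)

-- ===== PORT B =====
def camping_vocabulary_alt (friends : List (String × List String)) : List String × (List (String × List String)) × (List (String × List String)) :=
  let items := friends.map (fun p => (p.1, PySem.Set.ofList p.2))
  -- suffix[j] = union of the sets of items[j:], built back-to-front by prepending
  let suffix := items.foldr (fun p acc => (PySem.Set.union p.2 (acc.headD [])) :: acc)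
      ([[]] : List (PySem.Set String))
  let common := (items.drop 1).foldl (fun c p => PySem.Set.inter c p.2) ((items.headD ("", [])).2)
  let fin := items.zipIdx.foldl
      (fun (acc : PySem.Dict String (PySem.Set String) × PySem.Dict String (PySem.Set String) × PySem.Set String) pi =>
        let others := PySem.Set.union acc.2.2 (suffix.getD (pi.2 + 1) [])
        (acc.1.insert pi.1.1 (PySem.Set.diff pi.1.2 others),
         acc.2.1.insert pi.1.1 (PySem.Set.diff others pi.1.2),
         PySem.Set.union acc.2.2 pi.1.2))
      (PySem.Dict.empty, PySem.Dict.empty, ([] : PySem.Set String))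
  (common, fin.1.items, fin.2.1.items)

-- ===== PRECONDITION & SPEC =====
-- friends is a Python dict, so its association-list representation has distinct keys (Nodup);
-- with fewer than two keys A raises TypeError (set.union/intersection with no arguments).
def Pre_camping_vocabulary (friends : List (String × List String)) : Prop :=
  (friends.map Prod.fst).Nodup ∧ 2 ≤ friends.length
instance (friends : List (String × List String)) : Decidable (Pre_camping_vocabulary friends) := by unfold Pre_camping_vocabulary; infer_instance

def pvWitness_camping_vocabulary : (List (String × List String)) :=
  [("amy", ["pot", "tent"]), ("bob", ["pot", "axe"])]

def Spec_camping_vocabulary (friends : List (String × List String)) (out : List String × (List (String × List String)) × (List (String × List String))) : Prop := out = camping_vocabulary_alt friends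
instance (friends : List (String × List String)) (out : List String × (List (String × List String)) × (List (String × List String))) : Decidable (Spec_camping_vocabulary friends out) := by unfold Spec_camping_vocabulary; infer_instance

-- ===== CLAIM (what is proved, stated in full; the proofs are below) =====
def Claim_equal_camping_vocabulary : Prop := ∀ (friends : List (String × List String)), Dom_camping_vocabulary friends → Pre_camping_vocabulary friends → Spec_camping_vocabulary friends (camping_vocabulary friends)

-- ===== LEMMAS AND PROOFS =====

def pvBigU (l : List (PySem.Set String)) : PySem.Set String := l.foldl PySem.Set.union []

theorem pv_union_nil_left (t : PySem.Set String) (ht : t.Nodup) : PySem.Set.union [] t = t := by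
  show PySem.Set.update [] t = t
  rw [PySem.Set.update_eq_append_filter, PySem.Set.ofList_eq_self_of_nodup t ht]
  simp [PySem.Set.contains]

theorem pv_union_eq (s t : PySem.Set String) (ht : t.Nodup) :
    PySem.Set.union s t = s ++ t.filter (fun y => !s.contains y) := by
  show PySem.Set.update s t = _
  rw [PySem.Set.update_eq_append_filter, PySem.Set.ofList_eq_self_of_nodup t ht]

theorem pv_union_assoc (a b c : PySem.Set String) (hb : b.Nodup) (hc : c.Nodup) :
    PySem.Set.union (PySem.Set.union a b) c = PySem.Set.union a (PySem.Set.union b c) := by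
  rw [pv_union_eq a b hb, pv_union_eq _ c hc, pv_union_eq a _ (PySem.Set.nodup_union b c hb),
      pv_union_eq b c hc]
  simp only [List.filter_append, List.append_assoc, List.filter_filter]
  congr 2
  apply List.filter_congr
  intro y _
  by_cases hA : y ∈ a <;> by_cases hB : y ∈ b <;>
    simp [PySem.Set.contains, List.contains_eq_mem, List.mem_filter, hA, hB]

theorem pv_foldl_union_nodup (l : List (PySem.Set String)) :
    ∀ x : PySem.Set String, x.Nodup → (l.foldl PySem.Set.union x).Nodup := by
  induction l with
  | nil => intro x hx; exact hx
  | cons s l ih => intro x hx; exact ih _ (PySem.Set.nodup_union x s hx)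

theorem pvBigU_nodup (l : List (PySem.Set String)) : (pvBigU l).Nodup := by
  exact pv_foldl_union_nodup l [] (List.nodup_nil)

theorem pv_union_empty_right (x : PySem.Set String) : PySem.Set.union x [] = x := by
  show PySem.Set.update x [] = x
  rfl

theorem pv_foldl_union (l : List (PySem.Set String)) (hl : ∀ s ∈ l, List.Nodup s) :
    ∀ x : PySem.Set String, l.foldl PySem.Set.union x = PySem.Set.union x (pvBigU l) := by
  induction l with
  | nil => intro x; simp [pvBigU, pv_union_empty_right]
  | cons s l ih =>
    intro x
    have hs : List.Nodup s := hl s (by simp)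
    have hl' : ∀ t ∈ l, List.Nodup t := fun t ht => hl t (by simp [ht])
    have h1 : pvBigU (s :: l) = PySem.Set.union s (pvBigU l) := by
      show (l.foldl PySem.Set.union (PySem.Set.union [] s)) = _
      rw [pv_union_nil_left s hs, ih hl']
    simp only [List.foldl_cons]
    rw [ih hl', h1, pv_union_assoc x s (pvBigU l) hs (pvBigU_nodup l)]

theorem pvUnionFold_eq_bigU (l : List (PySem.Set String)) (hl : ∀ s ∈ l, List.Nodup s) :
    pvUnionFold l = pvBigU l := by
  match l with
  | [] => rfl
  | v :: vs =>
    show vs.foldl PySem.Set.union v = _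
    have hv : List.Nodup v := hl v (by simp)
    have hvs : ∀ t ∈ vs, List.Nodup t := fun t ht => hl t (by simp [ht])
    show vs.foldl PySem.Set.union v = pvBigU (v :: vs)
    show _ = (vs.foldl PySem.Set.union (PySem.Set.union [] v))
    rw [pv_union_nil_left v hv]

theorem pvBigU_append (l₁ l₂ : List (PySem.Set String)) (h₂ : ∀ s ∈ l₂, List.Nodup s) :
    pvBigU (l₁ ++ l₂) = PySem.Set.union (pvBigU l₁) (pvBigU l₂) := by
  show (l₁ ++ l₂).foldl PySem.Set.union [] = _
  rw [List.foldl_append]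
  exact pv_foldl_union l₂ h₂ _

theorem pv_headD_eq_getD (l : List (PySem.Set String)) : l.headD [] = l.getD 0 [] := by
  cases l <;> rfl

theorem pv_suffix_getD (L : List (String × PySem.Set String))
    (hL : ∀ p ∈ L, List.Nodup p.2) : ∀ (j : Nat), j ≤ L.length →
    (L.foldr (fun p acc => (PySem.Set.union p.2 (acc.headD [])) :: acc)
        ([[]] : List (PySem.Set String))).getD j []
      = pvBigU ((L.map Prod.snd).drop j) := by
  induction L with
  | nil =>
    intro j hj
    have hj0 : j = 0 := by simpa using hj
    subst hj0; rfl
  | cons p L ih =>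
    have hp : List.Nodup p.2 := hL p (by simp)
    have hL' : ∀ q ∈ L, List.Nodup q.2 := fun q hq => hL q (by simp [hq])
    intro j hj
    simp only [List.foldr_cons]
    cases j with
    | zero =>
      simp only [List.getD_cons_zero, List.drop_zero, List.map_cons]
      rw [pv_headD_eq_getD, ih hL' 0 (by omega)]
      have : pvBigU (p.2 :: L.map Prod.snd) = PySem.Set.union p.2 (pvBigU (L.map Prod.snd)) := by
        show (List.foldl PySem.Set.union (PySem.Set.union [] p.2) (L.map Prod.snd)) = _
        rw [pv_union_nil_left p.2 hp, pv_foldl_union _ (by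
          intro s hs
          obtain ⟨q, hq, rfl⟩ := List.mem_map.mp hs
          exact hL' q hq)]
      rw [this]
      simp
    | succ j =>
      simp only [List.getD_cons_succ, List.map_cons, List.drop_succ_cons]
      exact ih hL' j (by simpa using hj)


theorem pv_filter_ne (K : List String) (hK : K.Nodup) (i : Nat) (hi : i < K.length) :
    K.filter (fun f => f != K[i]) = K.take i ++ K.drop (i + 1) := by
  have hdec : K = K.take i ++ K[i] :: K.drop (i + 1) := by
    rw [← List.drop_eq_getElem_cons hi, List.take_append_drop]
  generalize hx : K[i] = x at hdec ⊢
  have hnd : (K.take i ++ x :: K.drop (i + 1)).Nodup := hdec ▸ hK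
  rw [List.nodup_append] at hnd
  obtain ⟨h1, h2, h3⟩ := hnd
  rw [List.nodup_cons] at h2
  conv_lhs => rw [hdec]
  rw [List.filter_append, List.filter_cons]
  have e1 : (K.take i).filter (fun f => f != x) = K.take i := by
    apply List.filter_eq_self.mpr
    intro y hy
    simpa using h3 y hy x (by simp)
  have e2 : (K.drop (i + 1)).filter (fun f => f != x) = K.drop (i + 1) := by
    apply List.filter_eq_self.mpr
    intro y hy
    simp only [bne_iff_ne, ne_eq]
    intro hxe
    exact h2.1 (hxe ▸ hy)
  simp [e1, e2]

-- the B-side main loop, its insertions split into two plain dict folds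
theorem pv_loop (sfx : List (PySem.Set String)) (L : List (String × PySem.Set String))
    (hS : ∀ p ∈ L, List.Nodup p.2) :
    ∀ (rest : List (String × PySem.Set String)) (j : Nat)
      (u m : PySem.Dict String (PySem.Set String)) (pre : PySem.Set String),
      rest = L.drop j → pre = pvBigU ((L.map Prod.snd).take j) →
      ((rest.zipIdx j).foldl
        (fun (acc : PySem.Dict String (PySem.Set String) × PySem.Dict String (PySem.Set String) × PySem.Set String) pi =>
          let others := PySem.Set.union acc.2.2 (sfx.getD (pi.2 + 1) [])
          (acc.1.insert pi.1.1 (PySem.Set.diff pi.1.2 others),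
           acc.2.1.insert pi.1.1 (PySem.Set.diff others pi.1.2),
           PySem.Set.union acc.2.2 pi.1.2))
        (u, m, pre))
      = ((rest.zipIdx j).foldl (fun d pi => d.insert pi.1.1 (PySem.Set.diff pi.1.2
            (PySem.Set.union (pvBigU ((L.map Prod.snd).take pi.2)) (sfx.getD (pi.2 + 1) [])))) u,
         (rest.zipIdx j).foldl (fun d pi => d.insert pi.1.1 (PySem.Set.diff
            (PySem.Set.union (pvBigU ((L.map Prod.snd).take pi.2)) (sfx.getD (pi.2 + 1) [])) pi.1.2)) m,
         pvBigU ((L.map Prod.snd).take (j + rest.length))) := by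
  intro rest
  induction rest with
  | nil =>
    intro j u m pre _ hpre
    simp [hpre]
  | cons p rest ih =>
    intro j u m pre hrest hpre
    have hj : j < L.length := by
      by_contra h
      rw [List.drop_eq_nil_of_le (by omega)] at hrest
      exact List.cons_ne_nil p rest hrest
    have hdrop : L.drop j = L[j] :: L.drop (j + 1) := List.drop_eq_getElem_cons hj
    rw [hdrop] at hrest
    obtain ⟨hp, hrest'⟩ := List.cons_eq_cons.mp hrest
    have hjm : j < (L.map Prod.snd).length := by simpa using hj
    have hpre' : PySem.Set.union pre p.2 = pvBigU ((L.map Prod.snd).take (j + 1)) := by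
      rw [List.take_succ_eq_append_getElem hjm,
          pvBigU_append _ _ (by
            intro s hs
            simp only [List.mem_singleton] at hs
            subst hs
            simp only [List.getElem_map]
            exact hS L[j] (by exact List.getElem_mem hj)),
          hpre]
      congr 1
      have : pvBigU [(L.map Prod.snd)[j]] = (L.map Prod.snd)[j] := by
        show PySem.Set.union [] _ = _
        exact pv_union_nil_left _ (by
          simp only [List.getElem_map]
          exact hS L[j] (List.getElem_mem hj))
      rw [this, hp]
      simp
    rw [List.zipIdx_cons]
    simp only [List.foldl_cons]
    rw [ih (j + 1) _ _ _ hrest' hpre']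
    have harith : j + 1 + rest.length = j + (p :: rest).length := by simp; omega
    rw [harith, hpre]

theorem pv_zip_keys (L : List (String × PySem.Set String)) :
    L.zipIdx.map (fun pi => pi.1.1) = L.map Prod.fst := by
  have : (fun (pi : (String × PySem.Set String) × Nat) => pi.1.1)
      = (Prod.fst ∘ Prod.fst) := rfl
  rw [this, ← List.map_map, List.zipIdx_map_fst]

theorem pv_getD_mk (L : List (String × PySem.Set String)) (hnd : (L.map Prod.fst).Nodup) :
    ∀ p ∈ L, (PySem.Dict.mk L).getD p.1 [] = p.2 := by
  intro p hp
  exact PySem.Dict.getD_of_mem_items _ (by simpa using hp) (by simpa [PySem.Dict.keys] using hnd) []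

theorem pv_others_eq (L : List (String × PySem.Set String))
    (hnd : (L.map Prod.fst).Nodup) (hS : ∀ p ∈ L, List.Nodup p.2)
    (i : Nat) (hi : i < L.length) :
    pvUnionFold (List.map (fun f => (PySem.Dict.mk L).getD f [])
        (List.filter (fun f => f != L[i].1) (PySem.Dict.mk L).keys))
      = PySem.Set.union (pvBigU ((L.map Prod.snd).take i))
          ((L.foldr (fun p acc => (PySem.Set.union p.2 (acc.headD [])) :: acc)
              ([[]] : List (PySem.Set String))).getD (i + 1) []) := by
  have hkeys : (PySem.Dict.mk L).keys = L.map Prod.fst := by simp [PySem.Dict.keys]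
  have hmapg : (L.map Prod.fst).map (fun f => (PySem.Dict.mk L).getD f []) = L.map Prod.snd := by
    rw [List.map_map]
    apply List.map_congr_left
    intro p hp
    simpa using pv_getD_mk L hnd p hp
  have hKi : L[i].1 = (L.map Prod.fst)[i]'(by simpa using hi) := by simp
  rw [hkeys, hKi, pv_filter_ne _ hnd i (by simpa using hi), List.map_append]
  have h1 : ((L.map Prod.fst).take i).map (fun f => (PySem.Dict.mk L).getD f [])
      = (L.map Prod.snd).take i := by rw [List.map_take, hmapg]
  have h2 : ((L.map Prod.fst).drop (i + 1)).map (fun f => (PySem.Dict.mk L).getD f [])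
      = (L.map Prod.snd).drop (i + 1) := by rw [List.map_drop, hmapg]
  have hSnod : ∀ s ∈ L.map Prod.snd, List.Nodup s := by
    intro s hs
    obtain ⟨p, hp, rfl⟩ := List.mem_map.mp hs
    exact hS p hp
  rw [h1, h2,
      pvUnionFold_eq_bigU _ (by
        intro s hs
        rcases List.mem_append.mp hs with h | h
        · exact hSnod s (List.mem_of_mem_take h)
        · exact hSnod s (List.mem_of_mem_drop h)),
      pvBigU_append _ _ (fun s hs => hSnod s (List.mem_of_mem_drop hs)),
      pv_suffix_getD L hS (i + 1) (by omega)]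

set_option maxHeartbeats 1000000 in
theorem pv_main (L : List (String × PySem.Set String))
    (hnd : (L.map Prod.fst).Nodup) (hS : ∀ p ∈ L, List.Nodup p.2) (hlen : 2 ≤ L.length) :
    (pvInterFold (PySem.Dict.mk L).values,
      (List.foldl
          (fun u p =>
            u.insert p.1
              (p.2.diff
                (pvUnionFold
                  (List.map (fun f => (PySem.Dict.mk L).getD f [])
                    (List.filter (fun f => f != p.1) (PySem.Dict.mk L).keys)))))
          PySem.Dict.empty (PySem.Dict.mk L).items).items,
      (List.foldl
          (fun u p =>
            u.insert p.1
              ((pvUnionFold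
                    (List.map (fun f => (PySem.Dict.mk L).getD f [])
                      (List.filter (fun f => f != p.1) (PySem.Dict.mk L).keys))).diff
                p.2))
          PySem.Dict.empty (PySem.Dict.mk L).items).items) =
    (List.foldl (fun c p => c.inter p.2) (L.headD ("", [])).2 (L.drop 1),
      (List.foldl
            (fun (acc : PySem.Dict String (PySem.Set String) × PySem.Dict String (PySem.Set String) × PySem.Set String) pi =>
              (acc.1.insert pi.1.1
                  (pi.1.2.diff
                    (acc.2.2.union
                      ((List.foldr (fun p acc => p.2.union (acc.headD []) :: acc) [[]] L).getD
                        (pi.2 + 1) []))),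
                acc.2.1.insert pi.1.1
                  ((acc.2.2.union
                        ((List.foldr (fun p acc => p.2.union (acc.headD []) :: acc) [[]] L).getD
                          (pi.2 + 1) [])).diff
                    pi.1.2),
                acc.2.2.union pi.1.2))
            (PySem.Dict.empty, PySem.Dict.empty, [])
            L.zipIdx).1.items,
      (List.foldl
            (fun (acc : PySem.Dict String (PySem.Set String) × PySem.Dict String (PySem.Set String) × PySem.Set String) pi =>
              (acc.1.insert pi.1.1
                  (pi.1.2.diff
                    (acc.2.2.union
                      ((List.foldr (fun p acc => p.2.union (acc.headD []) :: acc) [[]] L).getD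
                        (pi.2 + 1) []))),
                acc.2.1.insert pi.1.1
                  ((acc.2.2.union
                        ((List.foldr (fun p acc => p.2.union (acc.headD []) :: acc) [[]] L).getD
                          (pi.2 + 1) [])).diff
                    pi.1.2),
                acc.2.2.union pi.1.2))
            (PySem.Dict.empty, PySem.Dict.empty, [])
            L.zipIdx).2.1.items) := by
  have hloop := pv_loop (List.foldr (fun p acc => (PySem.Set.union p.2 (acc.headD [])) :: acc)
      ([[]] : List (PySem.Set String)) L) L hS L 0 PySem.Dict.empty PySem.Dict.empty []
      (by simp) rfl
  simp only [Prod.mk.injEq]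
  refine ⟨?_, ?_, ?_⟩
  · -- common things
    obtain ⟨a, T, rfl⟩ : ∃ a T, L = a :: T := by
      cases L with
      | nil => simp at hlen
      | cons a T => exact ⟨a, T, rfl⟩
    show pvInterFold ((a :: T).map (fun q => q.2)) = _
    simp only [List.map_cons]
    show (T.map (fun q => q.2)).foldl PySem.Set.inter a.2 = _
    rw [List.foldl_map]
    simp
  · rw [hloop]
    have hA := PySem.Dict.items_foldl_insert_fresh L (fun p => p.1)
      (fun p => p.2.diff (pvUnionFold (List.map (fun f => (PySem.Dict.mk L).getD f [])
        (List.filter (fun f => f != p.1) (PySem.Dict.mk L).keys))))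
      PySem.Dict.empty (by intro a _; simp) (by simpa using hnd)
    have hB := PySem.Dict.items_foldl_insert_fresh L.zipIdx (fun pi => pi.1.1)
      (fun pi => pi.1.2.diff (PySem.Set.union (pvBigU ((L.map Prod.snd).take pi.2))
        ((List.foldr (fun p acc => (PySem.Set.union p.2 (acc.headD [])) :: acc)
          ([[]] : List (PySem.Set String)) L).getD (pi.2 + 1) [])))
      PySem.Dict.empty (by intro a _; simp) (by rw [pv_zip_keys]; simpa using hnd)
    simp only [show (PySem.Dict.empty : PySem.Dict String (PySem.Set String)).items = [] from rfl,
      List.nil_append] at hA hB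
    rw [hA, hB]
    apply List.ext_getElem (by simp)
    intro i hi1 hi2
    simp only [List.getElem_map, List.getElem_zipIdx]
    refine Prod.ext (by simp) ?_
    rw [pv_others_eq L hnd hS i (by simpa using hi1)]
    simp
  · rw [hloop]
    have hA := PySem.Dict.items_foldl_insert_fresh L (fun p => p.1)
      (fun p => (pvUnionFold (List.map (fun f => (PySem.Dict.mk L).getD f [])
        (List.filter (fun f => f != p.1) (PySem.Dict.mk L).keys))).diff p.2)
      PySem.Dict.empty (by intro a _; simp) (by simpa using hnd)
    have hB := PySem.Dict.items_foldl_insert_fresh L.zipIdx (fun pi => pi.1.1)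
      (fun pi => (PySem.Set.union (pvBigU ((L.map Prod.snd).take pi.2))
        ((List.foldr (fun p acc => (PySem.Set.union p.2 (acc.headD [])) :: acc)
          ([[]] : List (PySem.Set String)) L).getD (pi.2 + 1) [])).diff pi.1.2)
      PySem.Dict.empty (by intro a _; simp) (by rw [pv_zip_keys]; simpa using hnd)
    simp only [show (PySem.Dict.empty : PySem.Dict String (PySem.Set String)).items = [] from rfl,
      List.nil_append] at hA hB
    rw [hA, hB]
    apply List.ext_getElem (by simp)
    intro i hi1 hi2
    simp only [List.getElem_map, List.getElem_zipIdx]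
    refine Prod.ext (by simp) ?_
    rw [pv_others_eq L hnd hS i (by simpa using hi1)]
    simp

theorem pv_vocab_eq (friends : List (String × List String))
    (hnd : (friends.map Prod.fst).Nodup) :
    friends.foldl (fun d p => d.insert p.1 (PySem.Set.ofList p.2)) PySem.Dict.empty
      = PySem.Dict.mk (friends.map (fun p => (p.1, PySem.Set.ofList p.2))) := by
  apply PySem.Dict.ext
  have h := PySem.Dict.items_foldl_insert_fresh friends (fun p => p.1)
      (fun p => PySem.Set.ofList p.2) PySem.Dict.empty
      (by intro a _; simp) (by simpa using hnd)
  simpa using h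

set_option maxHeartbeats 1000000 in
theorem camping_vocabulary_spec : Claim_equal_camping_vocabulary := by
  intro friends _hdom hpre
  obtain ⟨hnd, hlen⟩ := hpre
  unfold Spec_camping_vocabulary
  simp only [camping_vocabulary, camping_vocabulary_alt]
  rw [pv_vocab_eq friends hnd]
  have hndL : ((friends.map (fun p => (p.1, PySem.Set.ofList p.2))).map Prod.fst).Nodup := by
    simpa [List.map_map, Function.comp] using hnd
  have hSL : ∀ p ∈ friends.map (fun p => (p.1, PySem.Set.ofList p.2)), List.Nodup p.2 := by
    intro p hp
    obtain ⟨q, _, rfl⟩ := List.mem_map.mp hp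
    exact PySem.Set.nodup_ofList _
  have hlenL : 2 ≤ (friends.map (fun p => (p.1, PySem.Set.ofList p.2))).length := by
    simpa using hlen
  exact pv_main (friends.map (fun p => (p.1, PySem.Set.ofList p.2))) hndL hSL hlenL
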